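-- pv_equiv track=rewrite | github.com/xiaoguangdong/Sage | scripts/models/label_hs300_daily_weekly.py | _fuse_with_confirmation
-- ===== SOURCE A (Python) =====
-- def _fuse_with_confirmation(base_labels, confirm_labels, confirm_days):
--     fused = []
--     last_confirm = None
--     confirm_streak = 0
--
--     for i in range(len(base_labels)):
--         base = int(base_labels[i])
--         confirm = int(confirm_labels[i])
--
--         if not fused:
--             fused.append(base)
--             last_confirm = confirm
--             confirm_streak = 1
--             continue
--
--         if confirm == last_confirm:
--             confirm_streak += 1
--         else:
--             last_confirm = confirm
--             confirm_streak = 1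
--
--         if base == confirm:
--             fused.append(base)
--             continue
--
--         # 不一致时：等待均线连续确认
--         if confirm_streak >= confirm_days:
--             fused.append(confirm)
--         else:
--             fused.append(fused[-1])
--
--     return fused
-- ===== SOURCE B (Python) =====
-- def _fuse_with_confirmation(base_labels, confirm_labels, confirm_days):
--     n = len(base_labels)
--     pairs = [(int(base_labels[i]), int(confirm_labels[i])) for i in range(n)]
--     # Segment the sequence into maximal runs of equal confirm value; inside each
--     # run, decide each position locally (decided value, or None when undecided).
--     decided = []
--     first = True
--     while pairs:
--         c = pairs[0][1]
--         k = 1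
--         while k < len(pairs) and pairs[k][1] == c:
--             k += 1
--         for pos in range(k):
--             b = pairs[pos][0]
--             if first:
--                 decided.append(b)
--                 first = False
--             elif b == c:
--                 decided.append(b)
--             elif pos + 1 >= confirm_days:
--                 decided.append(c)
--             else:
--                 decided.append(None)
--         pairs = pairs[k:]
--     # Forward-fill: every undecided position takes the latest decided value.
--     out = []
--     cur = None
--     for d in decided:
--         if d is not None:
--             cur = d
--         out.append(cur)
--     return out
-- ===== Notes on version B (the rewrite author's own statement) =====
-- stated objective: alternative
-- what changed: B replaces A's single stateful loop (last_confirm/confirm_streak counter plus a fused[-1] carry read) by run segmentation: it slices the sequence into maximal runs of equal confirm value, decides each position locally inside its run (or marks it undecided), and then forward-fills undecided positions in a separate pass; no streak counter and no read of the output list.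
import Mathlib
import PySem

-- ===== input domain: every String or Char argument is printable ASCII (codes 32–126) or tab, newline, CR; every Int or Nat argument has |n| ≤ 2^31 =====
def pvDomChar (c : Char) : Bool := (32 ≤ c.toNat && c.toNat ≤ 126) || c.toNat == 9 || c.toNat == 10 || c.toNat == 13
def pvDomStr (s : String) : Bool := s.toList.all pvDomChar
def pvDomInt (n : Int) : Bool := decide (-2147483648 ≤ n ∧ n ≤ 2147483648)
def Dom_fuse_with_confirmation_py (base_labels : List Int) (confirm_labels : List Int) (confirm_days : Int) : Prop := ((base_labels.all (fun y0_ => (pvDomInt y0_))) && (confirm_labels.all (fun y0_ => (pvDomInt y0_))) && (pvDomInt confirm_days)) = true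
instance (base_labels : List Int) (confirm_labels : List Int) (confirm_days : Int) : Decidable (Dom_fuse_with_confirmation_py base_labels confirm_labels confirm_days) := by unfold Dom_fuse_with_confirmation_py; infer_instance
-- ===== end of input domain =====

-- B replaces A's stateful streak/carry loop by run segmentation: maximal runs of equal confirm
-- value, a local decision per position inside its run, then a forward-fill pass; alternative, same cost.


-- ===== PORT A =====
-- A's single loop over range(len(base_labels)) with state (fused, last_confirm, confirm_streak).
-- pyGet? returns none exactly where Python raises IndexError; Pre_ excludes those inputs, so the
-- .getD 0 fallback is never reached on admitted inputs.
def pvALoop (base confirm : List Int) (days : Int) (n : Nat) (i : Nat)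
    (fused : List Int) (last : Option Int) (streak : Int) : List Int :=
  if _h : i < n then
    let b := (PySem.List.pyGet? base (i : Int)).getD 0
    let c := (PySem.List.pyGet? confirm (i : Int)).getD 0
    if fused.isEmpty then
      pvALoop base confirm days n (i + 1) [b] (some c) 1
    else
      let streak' := if some c = last then streak + 1 else (1 : Int)
      let last'   := if some c = last then last else some c
      let v := if b = c then b
               else if streak' ≥ days then c
               else (PySem.List.pyGet? fused (-1)).getD 0   -- fused[-1]
      pvALoop base confirm days n (i + 1) (fused ++ [v]) last' streak'
  else fused
termination_by n - i

def fuse_with_confirmation_py (base_labels : List Int) (confirm_labels : List Int) (confirm_days : Int) : List Int :=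
  pvALoop base_labels confirm_labels confirm_days base_labels.length 0 [] none 0

-- ===== PORT B =====
-- inner `for pos in range(k)` loop of Source B: decide each position of one run locally
def pvDecideRun (days c : Int) : List (Int × Int) → Int → Bool → List (Option Int)
  | [], _, _ => []
  | (b, _) :: r, pos, first =>
      let d := if first then some b
               else if b = c then some b
               else if pos + 1 ≥ days then some c
               else none
      d :: pvDecideRun days c r (pos + 1) false

-- outer `while pairs` loop of Source B: slice off one maximal run of equal confirm value
def pvPairsLoop (days : Int) : List (Int × Int) → Bool → List (Option Int)
  | [], _ => []
  | (b, c) :: tl, first =>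
      let run' := tl.takeWhile (fun p => p.2 = c)   -- the k-scan: k = 1 + run'.length
      let rest := tl.dropWhile (fun p => p.2 = c)   -- pairs[k:]
      pvDecideRun days c ((b, c) :: run') 0 first ++ pvPairsLoop days rest false
termination_by ps => ps.length
decreasing_by
  simpa using Nat.lt_succ_of_le (List.length_dropWhile_le (fun p => decide (p.2 = c)) tl)

-- forward-fill pass of Source B; cur is never none when an element is emitted (decided[0] is always
-- set when the list is nonempty), so .getD 0 only totalizes the Option
def pvFill : List (Option Int) → Option Int → List Int
  | [], _ => []
  | d :: ds, cur =>
      let cur' := if d.isSome then d else cur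
      cur'.getD 0 :: pvFill ds cur'

def fuse_with_confirmation_py_alt (base_labels : List Int) (confirm_labels : List Int) (confirm_days : Int) : List Int :=
  let n := base_labels.length
  let pairs := (List.range n).map
    (fun (i : Nat) => ((PySem.List.pyGet? base_labels (i : Int)).getD 0,
               (PySem.List.pyGet? confirm_labels (i : Int)).getD 0))
  pvFill (pvPairsLoop confirm_days pairs true) none

-- ===== PRECONDITION & SPEC =====
-- Pre_ excludes exactly the inputs where Python A raises IndexError (confirm_labels[i] for some
-- i < len(base_labels)); B raises IndexError on the same inputs.
def Pre_fuse_with_confirmation_py (base_labels : List Int) (confirm_labels : List Int) (confirm_days : Int) : Prop :=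
  base_labels.length ≤ confirm_labels.length
instance (base_labels : List Int) (confirm_labels : List Int) (confirm_days : Int) : Decidable (Pre_fuse_with_confirmation_py base_labels confirm_labels confirm_days) := by unfold Pre_fuse_with_confirmation_py; infer_instance

def pvWitness_fuse_with_confirmation_py : List Int × List Int × Int := ([1, -1, 1, -1], [1, 1, -1, -1], 2)

def Spec_fuse_with_confirmation_py (base_labels : List Int) (confirm_labels : List Int) (confirm_days : Int) (out : List Int) : Prop := out = fuse_with_confirmation_py_alt base_labels confirm_labels confirm_days
instance (base_labels : List Int) (confirm_labels : List Int) (confirm_days : Int) (out : List Int) : Decidable (Spec_fuse_with_confirmation_py base_labels confirm_labels confirm_days out) := by unfold Spec_fuse_with_confirmation_py; infer_instance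

-- ===== CLAIM (what is proved, stated in full; the proofs are below) =====
def Claim_equal_fuse_with_confirmation_py : Prop := ∀ (base_labels : List Int) (confirm_labels : List Int) (confirm_days : Int), Dom_fuse_with_confirmation_py base_labels confirm_labels confirm_days → Pre_fuse_with_confirmation_py base_labels confirm_labels confirm_days → Spec_fuse_with_confirmation_py base_labels confirm_labels confirm_days (fuse_with_confirmation_py base_labels confirm_labels confirm_days)

-- ===== LEMMAS AND PROOFS =====

-- Proof-only middle form of A's loop: the same iteration, re-expressed as structural recursion
-- over the remaining suffixes of base and of (confirm.take n).
def pvMid (days : Int) : List Int → List Int → List Int → Option Int → Int → List Int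
  | fused, b :: bs, c :: cs, last, streak =>
      let streak' := if some c = last then streak + 1 else (1 : Int)
      let last'   := if some c = last then last else some c
      let v := if b = c then b
               else if streak' ≥ days then c
               else fused.getLast?.getD 0
      pvMid days (fused ++ [v]) bs cs last' streak'
  | fused, _, _, _, _ => fused

-- Proof-only element-wise form of A's loop body for i ≥ 1, threading (last, streak, carry).
def pvAref (days : Int) : List (Int × Int) → Option Int → Int → Int → List Int
  | [], _, _, _ => []
  | (b, cc) :: ps, lastc, streak, carry =>
      let s' := if some cc = lastc then streak + 1 else (1 : Int)
      let last' := if some cc = lastc then lastc else some cc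
      let v := if b = cc then b else if s' ≥ days then cc else carry
      v :: pvAref days ps last' s' v

lemma pvALoop_eq_mid (base confirm : List Int) (days : Int)
    (hlen : base.length ≤ confirm.length) :
    ∀ (k i : Nat), i + k = base.length →
    ∀ (fused : List Int) (last : Option Int) (streak : Int), fused ≠ [] →
    pvALoop base confirm days base.length i fused last streak
      = pvMid days fused (base.drop i) ((confirm.take base.length).drop i) last streak := by
  intro k
  induction k with
  | zero =>
      intro i hi fused last streak hne
      rw [pvALoop]
      have h1 : ¬ i < base.length := by omega
      have h2 : base.drop i = [] := List.drop_eq_nil_of_le (by omega)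
      simp [h1, h2, pvMid]
  | succ k ih =>
      intro i hi fused last streak hne
      have hib : i < base.length := by omega
      have hic : i < confirm.length := by omega
      have hit : i < (confirm.take base.length).length := by
        simp [List.length_take]; omega
      rw [pvALoop]
      have hb : (PySem.List.pyGet? base (i : Int)).getD 0 = base[i] := by simp [hib]
      have hc : (PySem.List.pyGet? confirm (i : Int)).getD 0 = confirm[i] := by simp [hic]
      have hfe : fused.isEmpty = false := by
        cases fused with
        | nil => exact absurd rfl hne
        | cons x xs => simp
      have hdb : base.drop i = base[i] :: base.drop (i + 1) :=
        List.drop_eq_getElem_cons hib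
      have hdc : (confirm.take base.length).drop i
          = confirm[i] :: (confirm.take base.length).drop (i + 1) := by
        rw [List.drop_eq_getElem_cons hit]
        congr 1
        simp [List.getElem_take]
      simp only [hib, dif_pos, hfe, Bool.false_eq_true, if_false, hb, hc]
      rw [hdb, hdc, pvMid]
      have hlast : fused.getLast?.getD 0 = (PySem.List.pyGet? fused (-1)).getD 0 := by
        rw [PySem.List.pyGet?_neg_one]
      rw [← hlast]
      exact ih (i + 1) (by omega) _ _ _ (by simp)

lemma pvMid_eq_aref (days : Int) :
    ∀ (bs cs : List Int) (last : Option Int) (streak : Int) (fused : List Int) (lf : Int),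
    fused ≠ [] → fused.getLast?.getD 0 = lf →
    pvMid days fused bs cs last streak
      = fused ++ pvAref days (bs.zip cs) last streak lf := by
  intro bs
  induction bs with
  | nil =>
      intro cs last streak fused lf hne hlf
      cases cs <;> simp [pvMid, pvAref]
  | cons b bs ih =>
      intro cs last streak fused lf hne hlf
      cases cs with
      | nil => simp [pvMid, pvAref]
      | cons c cs =>
          simp only [pvMid, List.zip_cons_cons, pvAref]
          rw [hlf]
          set s' := if some c = last then streak + 1 else (1 : Int) with hs
          set v := if b = c then b else if s' ≥ days then c else lf with hv
          rw [ih cs _ s' (fused ++ [v]) v (by simp) (by simp)]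
          simp

-- the fill/decide step at one element of a run agrees with pvAref's step
lemma pvStep_eq (days b c pos carry : Int) :
    (if (if b = c then some b
         else if pos + 1 ≥ days then some c
         else (none : Option Int)).isSome
     then (if b = c then some b else if pos + 1 ≥ days then some c else (none : Option Int))
     else some carry)
      = some (if b = c then b else if pos + 1 ≥ days then c else carry) := by
  by_cases h1 : b = c
  · simp [h1]
  · by_cases h2 : pos + 1 ≥ days <;> simp [h1, h2]

-- inside one run (all confirm values = c): pvAref = decide-then-fill, given the continuation
lemma pvInner (days c : Int) (rest : List (Int × Int)) (Z : List (Option Int))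
    (hrest : ∀ (s carry' : Int), pvAref days rest (some c) s carry' = pvFill Z (some carry')) :
    ∀ (run : List (Int × Int)), (∀ p ∈ run, p.2 = c) → ∀ (pos carry : Int),
    pvAref days (run ++ rest) (some c) pos carry
      = pvFill (pvDecideRun days c run pos false ++ Z) (some carry) := by
  intro run
  induction run with
  | nil => intro _ pos carry; simpa using hrest pos carry
  | cons p r ih =>
      intro hc pos carry
      obtain ⟨b, cc⟩ := p
      have hcc : cc = c := hc (b, cc) (by simp)
      subst hcc
      simp only [List.cons_append, pvAref, pvDecideRun, pvFill, if_true,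
        Bool.false_eq_true, if_false]
      rw [pvStep_eq days b cc pos carry]
      simp only [Option.getD_some]
      rw [ih (fun q hq => hc q (by simp [hq])) (pos + 1) _]

-- the head of dropWhile fails the predicate
lemma pvHead_dropWhile {α : Type} (p : α → Bool) :
    ∀ (l : List α) (x : α), (l.dropWhile p).head? = some x → p x = false := by
  intro l
  induction l with
  | nil => intro x h; simp [List.dropWhile] at h
  | cons a l ih =>
      intro x h
      by_cases hp : p a
      · rw [List.dropWhile_cons_of_pos hp] at h; exact ih x h
      · rw [List.dropWhile_cons_of_neg hp] at h
        simp at h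
        rw [← h]
        simpa using hp

-- every element of takeWhile satisfies the predicate
lemma pvMem_takeWhile {α : Type} (p : α → Bool) :
    ∀ (l : List α) (x : α), x ∈ l.takeWhile p → p x = true := by
  intro l
  induction l with
  | nil => intro x h; simp [List.takeWhile] at h
  | cons a l ih =>
      intro x h
      by_cases hp : p a
      · rw [List.takeWhile_cons_of_pos hp] at h
        rcases List.mem_cons.mp h with h | h
        · rw [h]; exact hp
        · exact ih x h
      · rw [List.takeWhile_cons_of_neg hp] at h; simp at h

-- main bridge: at a run boundary (head's confirm ≠ prev), A's element-wise loop equals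
-- B's run-segmented decide-then-fill, for any entering streak value
lemma pvMain (days : Int) : ∀ (N : Nat) (ps : List (Int × Int)), ps.length ≤ N →
    ∀ (prev : Option Int), (∀ b c tl, ps = (b, c) :: tl → some c ≠ prev) →
    ∀ (s carry : Int),
    pvAref days ps prev s carry = pvFill (pvPairsLoop days ps false) (some carry) := by
  intro N
  induction N with
  | zero =>
      intro ps hps prev _ s carry
      have : ps = [] := List.eq_nil_of_length_eq_zero (by omega)
      subst this
      simp [pvAref, pvPairsLoop, pvFill]
  | succ N ih =>
      intro ps hps prev hhd s carry
      cases ps with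
      | nil => simp [pvAref, pvPairsLoop, pvFill]
      | cons p tl =>
          obtain ⟨b, c⟩ := p
          have hne : some c ≠ prev := hhd b c tl rfl
          rw [pvPairsLoop]
          set run' := tl.takeWhile (fun p => p.2 = c) with hrun
          set rest := tl.dropWhile (fun p => p.2 = c) with hrest
          have htl : tl = run' ++ rest := (List.takeWhile_append_dropWhile).symm
          -- peel the head element on both sides
          simp only [pvAref, if_neg hne, pvDecideRun, Bool.false_eq_true, if_false,
            List.cons_append, pvFill]
          rw [pvStep_eq days b c 0 carry]
          simp only [Option.getD_some]
          have h01 : (0 : Int) + 1 = 1 := by norm_num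
          rw [h01]
          congr 1
          -- remaining elements of the first run, then the rest
          have hrest_ih : ∀ (s' carry' : Int),
              pvAref days rest (some c) s' carry' = pvFill (pvPairsLoop days rest false) (some carry') := by
            intro s' carry'
            refine ih rest ?_ (some c) ?_ s' carry'
            · have h1 := List.length_dropWhile_le (fun p => decide (p.2 = c)) tl
              rw [← hrest] at h1
              simp only [List.length_cons] at hps
              omega
            · intro b' c' tl' hr
              have hpf := pvHead_dropWhile (fun p => decide (p.2 = c)) tl (b', c')
                (by rw [← hrest, hr]; rfl)
              simp at hpf
              simp [hpf]
          have hall : ∀ q ∈ run', q.2 = c := by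
            intro q hq
            have := pvMem_takeWhile (fun p => decide (p.2 = c)) tl q (by rw [hrun] at hq; exact hq)
            simpa using this
          rw [htl]
          exact pvInner days c rest (pvPairsLoop days rest false) hrest_ih run' hall 1 _

-- the pairs list built by Source B equals the zip of base with the truncated confirm list
lemma pvPairs_eq_zip (base confirm : List Int) (h : base.length ≤ confirm.length) :
    (List.range base.length).map
      (fun (i : Nat) => ((PySem.List.pyGet? base (i : Int)).getD 0,
                 (PySem.List.pyGet? confirm (i : Int)).getD 0))
      = base.zip (confirm.take base.length) := by
  apply List.ext_getElem
  · simp [List.length_take]; omega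
  · intro j h1 h2
    have hj : j < base.length := by simpa using h1
    have hjc : j < confirm.length := by omega
    simp only [List.getElem_map, List.getElem_range, List.getElem_zip, List.getElem_take,
      PySem.List.pyGet?_natCast]
    simp [hj, hjc]

-- ===== VERDICT (by name: the statement is the Claim_ definition above) =====
theorem fuse_with_confirmation_py_spec : Claim_equal_fuse_with_confirmation_py := by
  intro base confirm days _hdom hpre
  unfold Spec_fuse_with_confirmation_py
  unfold Pre_fuse_with_confirmation_py at hpre
  unfold fuse_with_confirmation_py fuse_with_confirmation_py_alt
  cases base with
  | nil =>
      rw [pvALoop]; simp [pvPairsLoop, pvFill]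
  | cons b0 rest =>
      cases confirm with
      | nil => exact absurd hpre (by simp)
      | cons c0 cs =>
          -- LHS: peel the first iteration of A's loop, pass through pvMid and pvAref
          rw [pvALoop]
          have h0b : (PySem.List.pyGet? (b0 :: rest) ((0 : Nat) : Int)).getD 0 = b0 := by simp
          have h0c : (PySem.List.pyGet? (c0 :: cs) ((0 : Nat) : Int)).getD 0 = c0 := by simp
          simp only [show (0:Nat) < (b0 :: rest).length from by simp, dif_pos,
            List.isEmpty_nil, if_true]
          rw [pvALoop_eq_mid (b0 :: rest) (c0 :: cs) days hpre rest.length 1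
            (by simp [Nat.add_comm]) _ _ _ (by simp), h0b, h0c]
          rw [pvMid_eq_aref days _ _ _ _ [b0] b0 (by simp) (by simp)]
          have hdb : (b0 :: rest).drop 1 = rest := by simp
          have hdc : ((c0 :: cs).take (b0 :: rest).length).drop 1 = cs.take rest.length := by simp
          rw [hdb, hdc]
          -- RHS: pairs = zip, then peel the first run's head
          rw [pvPairs_eq_zip (b0 :: rest) (c0 :: cs) hpre]
          have hz : (b0 :: rest).zip ((c0 :: cs).take (b0 :: rest).length)
              = (b0, c0) :: rest.zip (cs.take rest.length) := by simp
          rw [hz, pvPairsLoop]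
          set tl := rest.zip (cs.take rest.length) with htl
          set run' := tl.takeWhile (fun p => p.2 = c0) with hrun
          set rest' := tl.dropWhile (fun p => p.2 = c0) with hrest
          simp only [pvDecideRun, List.cons_append, pvFill, Option.isSome_some,
            if_true, Option.getD_some]
          congr 1
          have hrest_ih : ∀ (s' carry' : Int),
              pvAref days rest' (some c0) s' carry' = pvFill (pvPairsLoop days rest' false) (some carry') := by
            intro s' carry'
            refine pvMain days tl.length rest' ?_ (some c0) ?_ s' carry'
            · exact List.length_dropWhile_le _ tl
            · intro b' c' tl' hr
              have hpf := pvHead_dropWhile (fun p => decide (p.2 = c0)) tl (b', c') (by rw [← hrest, hr]; rfl)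
              simp at hpf
              simp [hpf]
          have hall : ∀ q ∈ run', q.2 = c0 := by
            intro q hq
            have := pvMem_takeWhile (fun p => decide (p.2 = c0)) tl q (by rw [hrun] at hq; exact hq)
            simpa using this
          have htlsplit : tl = run' ++ rest' := (List.takeWhile_append_dropWhile).symm
          rw [htlsplit]
          exact pvInner days c0 rest' (pvPairsLoop days rest' false) hrest_ih run' hall 1 b0
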